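-- pv_equiv track=rewrite | github.com/haranrk/things3-applescript-mcp | src/applescript/parsers.py | parse
-- ===== SOURCE A (Python) =====
-- from typing import Any, Dict, List, Optional, Union
--
-- def parse(raw_output: str) -> List[str]:
--     """Parse simple AppleScript list."""
--     # Remove outer braces
--     content = raw_output.strip()[1:-1]
--
--     if not content:
--         return []
--
--     # Split by comma (simple implementation for now)
--     items = []
--     current_item = ""
--     in_quotes = False
--
--     for char in content:
--         if char == '"':
--             in_quotes = not in_quotes
--         elif char == "," and not in_quotes:
--             items.append(current_item.strip())
--             current_item = ""
--             continue
--
--         current_item += char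
--
--     if current_item:
--         items.append(current_item.strip())
--
--     # Clean up quoted items
--     cleaned_items = []
--     for item in items:
--         if item.startswith('"') and item.endswith('"'):
--             cleaned_items.append(item[1:-1])
--         else:
--             cleaned_items.append(item)
--
--     return cleaned_items
-- ===== SOURCE B (Python) =====
-- from typing import List
--
-- def _consume(part: str, cur: str, items: List[str]) -> str:
--     """Outside-quotes text: each ',' ends the current item (stripped)."""
--     for ch in part:
--         if ch == ',':
--             items.append(cur.strip())
--             cur = ""
--         else:
--             cur += ch
--     return cur
--
-- def parse(raw_output: str) -> List[str]:
--     """Parse simple AppleScript list by splitting on '\"' and using part parity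
--     (even parts are outside quotes, odd parts inside) instead of a per-char toggle."""
--     content = raw_output.strip()[1:-1]
--     if not content:
--         return []
--
--     parts = content.split('"')
--     items: List[str] = []
--     cur = _consume(parts[0], "", items)
--     inside = True
--     for part in parts[1:]:
--         cur += '"'          # the delimiter consumed by split
--         if inside:
--             cur += part     # raw text inside quotes, commas kept
--         else:
--             cur = _consume(part, cur, items)
--         inside = not inside
--
--     if cur:
--         items.append(cur.strip())
--
--     return [it[1:-1] if it.startswith('"') and it.endswith('"') else it
--             for it in items]
-- ===== Notes on version B (the rewrite author's own statement) =====
-- stated objective: alternative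
-- what changed: Replaces the per-character quote-toggle state machine by splitting the content on '"' once and processing parts by parity (even parts are outside quotes and split on commas, odd parts are copied raw), reconstructing the consumed delimiters.
import Mathlib
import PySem

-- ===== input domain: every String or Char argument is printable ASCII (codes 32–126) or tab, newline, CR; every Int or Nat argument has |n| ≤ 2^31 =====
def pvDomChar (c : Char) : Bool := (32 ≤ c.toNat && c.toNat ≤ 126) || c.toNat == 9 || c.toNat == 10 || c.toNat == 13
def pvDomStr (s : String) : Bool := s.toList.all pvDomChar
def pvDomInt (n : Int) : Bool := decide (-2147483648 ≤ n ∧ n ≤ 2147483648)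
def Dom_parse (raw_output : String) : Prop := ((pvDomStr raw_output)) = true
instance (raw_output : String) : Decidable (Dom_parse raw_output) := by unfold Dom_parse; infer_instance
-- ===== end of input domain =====

-- B replaces A's per-character quote toggle by splitting on '"' and using part parity
-- (even parts outside quotes, odd parts inside); objective: alternative decomposition, same cost.

-- item cleanup shared verbatim by both Pythons: strip was applied at append time;
-- here: drop a surrounding quote pair (it[1:-1] when it starts and ends with '"')
def cleanItem (it : List Char) : List Char :=
  if PySem.Chars.startswith it ['"'] && PySem.Chars.endswith it ['"'] then
    PySem.List.slice it (some 1) (some (-1))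
  else it

-- ===== PORT A =====
-- A's per-character loop: state (items, current_item, in_quotes)
def aLoop : List Char → List (List Char) → List Char → Bool → List (List Char) × List Char
  | [], items, cur, _ => (items, cur)
  | c :: cs, items, cur, q =>
    if c = '"' then aLoop cs items (cur ++ ['"']) (!q)
    else if c = ',' && !q then aLoop cs (items ++ [PySem.Chars.strip cur]) [] q
    else aLoop cs items (cur ++ [c]) q

def parse (raw_output : String) : List String :=
  let content := PySem.List.slice (PySem.Chars.strip raw_output.toList) (some 1) (some (-1))
  if content = [] then []
  else
    let st := aLoop content [] [] false
    let items := if st.2 = [] then st.1 else st.1 ++ [PySem.Chars.strip st.2]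
    items.map (fun it => String.ofList (cleanItem it))

-- ===== PORT B =====
-- content.split('"') ported by hand (exact: one part per gap, empty parts kept)
def splitQ : List Char → List (List Char)
  | [] => [[]]
  | c :: cs =>
    if c = '"' then [] :: splitQ cs
    else
      match splitQ cs with
      | [] => [[c]]          -- unreachable: splitQ never returns []
      | p :: ps => (c :: p) :: ps

-- _consume: outside-quotes text, ',' ends the current item (stripped)
def consume : List Char → List Char → List (List Char) → List (List Char) × List Char
  | [], cur, items => (items, cur)
  | c :: p, cur, items =>
    if c = ',' then consume p [] (items ++ [PySem.Chars.strip cur])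
    else consume p (cur ++ [c]) items

-- the parity loop over parts[1:]; Bool = `inside`
def bRest : Bool → List (List Char) → List Char → List (List Char) → List (List Char) × List Char
  | _, [], cur, items => (items, cur)
  | true, p :: ps, cur, items => bRest false ps (cur ++ '"' :: p) items
  | false, p :: ps, cur, items =>
    let st := consume p (cur ++ ['"']) items
    bRest true ps st.2 st.1

def parse_alt (raw_output : String) : List String :=
  let content := PySem.List.slice (PySem.Chars.strip raw_output.toList) (some 1) (some (-1))
  if content = [] then []
  else
    match splitQ content with
    | [] => []               -- unreachable: splitQ never returns []
    | p0 :: rest =>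
      let s1 := consume p0 [] []
      let st := bRest true rest s1.2 s1.1
      let items := if st.2 = [] then st.1 else st.1 ++ [PySem.Chars.strip st.2]
      items.map (fun it => String.ofList (cleanItem it))

-- ===== PRECONDITION & SPEC =====
def Spec_parse (raw_output : String) (out : List String) : Prop := out = parse_alt raw_output
instance (raw_output : String) (out : List String) : Decidable (Spec_parse raw_output out) := by unfold Spec_parse; infer_instance

-- ===== CLAIM (what is proved, stated in full; the proofs are below) =====
def Claim_equal_parse : Prop := ∀ (raw_output : String), Dom_parse raw_output → Spec_parse raw_output (parse raw_output)

-- ===== LEMMAS AND PROOFS =====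

-- proof helper: B's processing of a parts list whose FIRST part is outside (q = false)
-- or inside (q = true) quotes, with no '"' re-inserted before that first part
def bCont : Bool → List (List Char) → List Char → List (List Char) → List (List Char) × List Char
  | _, [], cur, items => (items, cur)
  | false, p :: ps, cur, items =>
    let st := consume p cur items
    bRest true ps st.2 st.1
  | true, p :: ps, cur, items => bRest false ps (cur ++ p) items

theorem splitQ_ne_nil (cs : List Char) : splitQ cs ≠ [] := by
  cases cs with
  | nil => simp [splitQ]
  | cons c cs =>
    simp only [splitQ]
    split
    · simp
    · cases h : splitQ cs <;> simp

theorem splitQ_cons (cs : List Char) : ∃ p ps, splitQ cs = p :: ps := by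
  cases h : splitQ cs with
  | nil => exact absurd h (splitQ_ne_nil cs)
  | cons p ps => exact ⟨p, ps, rfl⟩

theorem aLoop_eq_bCont (cs : List Char) : ∀ (q : Bool) (cur : List Char) (items : List (List Char)),
    aLoop cs items cur q = bCont q (splitQ cs) cur items := by
  induction cs with
  | nil =>
    intro q cur items
    cases q <;> simp [aLoop, splitQ, bCont, consume, bRest]
  | cons c cs ih =>
    intro q cur items
    obtain ⟨p, ps, hsp⟩ := splitQ_cons cs
    by_cases hc : c = '"'
    · subst hc
      cases q with
      | false =>
        simp only [aLoop, Bool.not_false, splitQ, bCont, hsp, ih]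
        simp [consume, bRest]
      | true =>
        simp only [aLoop, Bool.not_true, splitQ, bCont, hsp, ih]
        simp [bRest]
    · have hsq : splitQ (c :: cs) = (c :: p) :: ps := by
        simp only [splitQ, if_neg hc, hsp]
      cases q with
      | true =>
        have : ¬ (c = ',' && !true) = true := by simp
        simp only [aLoop, if_neg hc, if_neg this, ih, hsq, hsp, bCont]
        simp [List.append_assoc]
      | false =>
        by_cases hcomma : c = ','
        · subst hcomma
          simp only [aLoop, if_neg hc, Bool.not_false, Bool.and_true, ih, hsq, hsp,
            bCont, consume]
          simp
        · have : ¬ (c = ',' && !false) = true := by simp [hcomma]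
          simp only [aLoop, if_neg hc, if_neg this, ih, hsq, hsp, bCont, consume, if_neg hcomma]

-- ===== VERDICT (by name: the statement is the Claim_ definition above) =====
theorem parse_spec : Claim_equal_parse := by
  intro raw_output _
  unfold Spec_parse parse parse_alt
  set content := PySem.List.slice (PySem.Chars.strip raw_output.toList) (some 1) (some (-1)) with hc
  by_cases h : content = []
  · simp [h]
  · obtain ⟨p0, rest, hsp⟩ := splitQ_cons content
    have key := aLoop_eq_bCont content false [] []
    rw [hsp] at key
    simp only [bCont] at key
    simp [h, hsp, key]
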